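-- pv_equiv track=rewrite | github.com/PLSE-Lab/Python-MLAPI-expl | python_sources/sf-salaries-by-gender.py | find_job_title
-- ===== SOURCE A (Python) =====
-- def find_job_title(row): #give credit to MattEvanoff because he made this function
--
--     police_title = ['police', 'sherif', 'probation', 'sergeant', 'officer', 'lieutenant']
--     fire_title = ['fire']
--     transit_title = ['mta', 'transit']
--     medical_title = ['anesth', 'medical', 'nurs', 'health', 'physician', 'orthopedic', 'pharm', 'care']
--     court_title = ['court', 'legal']
--     automotive_title = ['automotive', 'mechanic', 'truck']
--     engineer_title = ['engineer', 'engr', 'eng', 'program']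
--     general_laborer_title = ['general laborer', 'painter', 'inspector', 'carpenter',
--                              'electrician', 'plumber', 'maintenance']
--     aide_title = ['aide', 'assistant', 'secretary', 'attendant']
--
--     for police in police_title:
--         if police in row.lower():
--             return 'police'
--     for fire in fire_title:
--         if fire in row.lower():
--             return 'fire'
--     for aide in aide_title:
--         if aide in row.lower():
--             return 'assistant'
--     for transit in transit_title:
--         if transit in row.lower():
--             return 'transit'
--     for medical in medical_title:
--         if medical in row.lower():
--             return 'medical'
--     if 'airport' in row.lower():
--         return 'airport'
--     if 'worker' in row.lower():
--         return 'social worker'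
--     if 'architect' in row.lower():
--         return 'architect'
--     for court in court_title:
--         if court in row.lower():
--             return 'court'
--     if 'mayor' in row.lower():
--         return 'mayor'
--     if 'librar' in row.lower():
--         return 'library'
--     if 'guard' in row.lower():
--         return 'guard'
--     if 'public' in row.lower():
--         return 'public works'
--     if 'attorney' in row.lower():
--         return 'attorney'
--     if 'custodian' in row.lower():
--         return 'custodian'
--     if 'account' in row.lower():
--         return 'account'
--     if 'garden' in row.lower():
--         return 'gardener'
--     if 'recreation' in row.lower():
--         return 'recreation leader'
--     for automotive in automotive_title:
--         if automotive in row.lower():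
--             return 'automotive'
--     for engineer in engineer_title:
--         if engineer in row.lower():
--             return 'engineer'
--     for general_laborer in general_laborer_title:
--         if general_laborer in row.lower():
--             return 'general laborer'
--     if 'food serv' in row.lower():
--         return 'food service'
--     if 'clerk' in row.lower():
--         return 'clerk'
--     if 'porter' in row.lower():
--         return 'porter'
--     if 'analy' in row.lower():
--         return 'analyst'
--     if 'manager' in row.lower():
--         return 'manager'
--     else:
--         return 'other'
-- ===== SOURCE B (Python) =====
-- _GROUPS = [
--     (('police', 'sherif', 'probation', 'sergeant', 'officer', 'lieutenant'), 'police'),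
--     (('fire',), 'fire'),
--     (('aide', 'assistant', 'secretary', 'attendant'), 'assistant'),
--     (('mta', 'transit'), 'transit'),
--     (('anesth', 'medical', 'nurs', 'health', 'physician', 'orthopedic', 'pharm', 'care'), 'medical'),
--     (('airport',), 'airport'),
--     (('worker',), 'social worker'),
--     (('architect',), 'architect'),
--     (('court', 'legal'), 'court'),
--     (('mayor',), 'mayor'),
--     (('librar',), 'library'),
--     (('guard',), 'guard'),
--     (('public',), 'public works'),
--     (('attorney',), 'attorney'),
--     (('custodian',), 'custodian'),
--     (('account',), 'account'),
--     (('garden',), 'gardener'),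
--     (('recreation',), 'recreation leader'),
--     (('automotive', 'mechanic', 'truck'), 'automotive'),
--     (('engineer', 'engr', 'eng', 'program'), 'engineer'),
--     (('general laborer', 'painter', 'inspector', 'carpenter',
--       'electrician', 'plumber', 'maintenance'), 'general laborer'),
--     (('food serv',), 'food service'),
--     (('clerk',), 'clerk'),
--     (('porter',), 'porter'),
--     (('analy',), 'analyst'),
--     (('manager',), 'manager'),
-- ]
--
-- # one flat keyword list tagged with its priority rank and label
-- _FLAT = [(kw, rank, label)
--          for rank, (kws, label) in enumerate(_GROUPS)
--          for kw in kws]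
--
-- def find_job_title(row):
--     # exhaustive scan + argmin over priority ranks (no early-return cascade):
--     # every keyword is tested against low once; the matched keyword with the
--     # smallest rank decides the label.
--     low = row.lower()
--     best = None
--     for kw, rank, label in _FLAT:
--         if kw in low and (best is None or rank < best[0]):
--             best = (rank, label)
--     return best[1] if best is not None else 'other'
-- ===== Notes on version B (the rewrite author's own statement) =====
-- stated objective: alternative
-- what changed: A's 26-stage early-return cascade of per-group loops is replaced by a single exhaustive pass over one flat rank-tagged keyword list that selects the matched keyword with the minimum priority rank (argmin), with row.lower() computed once; ranks increase group-by-group, so the minimum-rank match equals the cascade's first hit.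
import Mathlib
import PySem

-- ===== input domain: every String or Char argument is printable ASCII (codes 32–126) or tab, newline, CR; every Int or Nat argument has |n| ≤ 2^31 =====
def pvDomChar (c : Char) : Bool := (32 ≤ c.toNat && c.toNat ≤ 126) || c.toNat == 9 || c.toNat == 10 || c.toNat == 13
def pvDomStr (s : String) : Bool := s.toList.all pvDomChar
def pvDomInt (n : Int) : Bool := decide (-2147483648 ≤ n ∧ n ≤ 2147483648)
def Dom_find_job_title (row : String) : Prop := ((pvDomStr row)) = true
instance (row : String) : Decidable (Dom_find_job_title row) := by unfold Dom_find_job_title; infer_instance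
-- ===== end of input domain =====

-- B replaces A's early-return cascade by an exhaustive scan of one flat rank-tagged keyword
-- list with argmin selection over priority ranks (objective: alternative algorithm).


-- ===== PORT A =====
-- the 'for kw in list: if kw in row.lower(): return label' loop, as structural recursion
def pvLoopHit (kws : List String) (row : String) : Bool :=
  match kws with
  | [] => false
  | k :: t => if PySem.Str.isIn k (PySem.Str.lower row) then true else pvLoopHit t row

def find_job_title (row : String) : String :=
  if pvLoopHit ["police", "sherif", "probation", "sergeant", "officer", "lieutenant"] row then "police"
  else if pvLoopHit ["fire"] row then "fire"
  else if pvLoopHit ["aide", "assistant", "secretary", "attendant"] row then "assistant"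
  else if pvLoopHit ["mta", "transit"] row then "transit"
  else if pvLoopHit ["anesth", "medical", "nurs", "health", "physician", "orthopedic", "pharm", "care"] row then "medical"
  else if PySem.Str.isIn "airport" (PySem.Str.lower row) then "airport"
  else if PySem.Str.isIn "worker" (PySem.Str.lower row) then "social worker"
  else if PySem.Str.isIn "architect" (PySem.Str.lower row) then "architect"
  else if pvLoopHit ["court", "legal"] row then "court"
  else if PySem.Str.isIn "mayor" (PySem.Str.lower row) then "mayor"
  else if PySem.Str.isIn "librar" (PySem.Str.lower row) then "library"
  else if PySem.Str.isIn "guard" (PySem.Str.lower row) then "guard"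
  else if PySem.Str.isIn "public" (PySem.Str.lower row) then "public works"
  else if PySem.Str.isIn "attorney" (PySem.Str.lower row) then "attorney"
  else if PySem.Str.isIn "custodian" (PySem.Str.lower row) then "custodian"
  else if PySem.Str.isIn "account" (PySem.Str.lower row) then "account"
  else if PySem.Str.isIn "garden" (PySem.Str.lower row) then "gardener"
  else if PySem.Str.isIn "recreation" (PySem.Str.lower row) then "recreation leader"
  else if pvLoopHit ["automotive", "mechanic", "truck"] row then "automotive"
  else if pvLoopHit ["engineer", "engr", "eng", "program"] row then "engineer"
  else if pvLoopHit ["general laborer", "painter", "inspector", "carpenter", "electrician", "plumber", "maintenance"] row then "general laborer"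
  else if PySem.Str.isIn "food serv" (PySem.Str.lower row) then "food service"
  else if PySem.Str.isIn "clerk" (PySem.Str.lower row) then "clerk"
  else if PySem.Str.isIn "porter" (PySem.Str.lower row) then "porter"
  else if PySem.Str.isIn "analy" (PySem.Str.lower row) then "analyst"
  else if PySem.Str.isIn "manager" (PySem.Str.lower row) then "manager"
  else "other"

-- ===== PORT B =====
def pvGroups : List (List String × String) :=
  [ (["police", "sherif", "probation", "sergeant", "officer", "lieutenant"], "police"),
    (["fire"], "fire"),
    (["aide", "assistant", "secretary", "attendant"], "assistant"),
    (["mta", "transit"], "transit"),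
    (["anesth", "medical", "nurs", "health", "physician", "orthopedic", "pharm", "care"], "medical"),
    (["airport"], "airport"),
    (["worker"], "social worker"),
    (["architect"], "architect"),
    (["court", "legal"], "court"),
    (["mayor"], "mayor"),
    (["librar"], "library"),
    (["guard"], "guard"),
    (["public"], "public works"),
    (["attorney"], "attorney"),
    (["custodian"], "custodian"),
    (["account"], "account"),
    (["garden"], "gardener"),
    (["recreation"], "recreation leader"),
    (["automotive", "mechanic", "truck"], "automotive"),
    (["engineer", "engr", "eng", "program"], "engineer"),
    (["general laborer", "painter", "inspector", "carpenter", "electrician", "plumber", "maintenance"], "general laborer"),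
    (["food serv"], "food service"),
    (["clerk"], "clerk"),
    (["porter"], "porter"),
    (["analy"], "analyst"),
    (["manager"], "manager") ]

-- the comprehension building _FLAT: every keyword tagged with its group's rank and label
def pvFlatten (r : Nat) (gs : List (List String × String)) : List (String × Nat × String) :=
  match gs with
  | [] => []
  | (kws, lbl) :: t => kws.map (fun k => (k, r, lbl)) ++ pvFlatten (r + 1) t

def pvFlat : List (String × Nat × String) := pvFlatten 0 pvGroups

-- one iteration of Source B's loop body: keep the matched entry of smallest rank
def pvBestStep (low : String) (best : Option (Nat × String)) (e : String × Nat × String) :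
    Option (Nat × String) :=
  if PySem.Str.isIn e.1 low &&
      (match best with | none => true | some b => decide (e.2.1 < b.1)) then
    some (e.2.1, e.2.2)
  else best

-- Source B's final "best[1] if best is not None else 'other'"
def pvFinish (best : Option (Nat × String)) : String :=
  match best with
  | some b => b.2
  | none => "other"

def find_job_title_alt (row : String) : String :=
  let low := PySem.Str.lower row
  pvFinish (pvFlat.foldl (pvBestStep low) none)

-- ===== PRECONDITION & SPEC =====
def Spec_find_job_title (row : String) (out : String) : Prop := out = find_job_title_alt row
instance (row : String) (out : String) : Decidable (Spec_find_job_title row out) := by unfold Spec_find_job_title; infer_instance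

-- ===== CLAIM (what is proved, stated in full; the proofs are below) =====
def Claim_equal_find_job_title : Prop := ∀ (row : String), Dom_find_job_title row → Spec_find_job_title row (find_job_title row)

-- ===== LEMMAS AND PROOFS =====
theorem pvLoopHit_eq_any (kws : List String) (row : String) :
    pvLoopHit kws row = kws.any (fun k => PySem.Str.isIn k (PySem.Str.lower row)) := by
  induction kws with
  | nil => rfl
  | cons k t ih => simp [pvLoopHit, ih]

-- spec helper: first matching group wins, carrying its rank
def pvFirstHit (low : String) (r : Nat) (gs : List (List String × String)) :
    Option (Nat × String) :=
  match gs with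
  | [] => none
  | (kws, lbl) :: t =>
    if kws.any (fun k => PySem.Str.isIn k low) then some (r, lbl)
    else pvFirstHit low (r + 1) t

theorem fold_keep_group (low : String) (kws : List String) (r rb : Nat) (lbl lb : String)
    (h : rb ≤ r) :
    (kws.map (fun k => (k, r, lbl))).foldl (pvBestStep low) (some (rb, lb)) = some (rb, lb) := by
  induction kws with
  | nil => rfl
  | cons k t ih =>
    simp only [List.map_cons, List.foldl_cons, pvBestStep]
    rw [if_neg]
    · exact ih
    · simp only [Bool.and_eq_true, decide_eq_true_eq]
      rintro ⟨-, hlt⟩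
      exact Nat.not_lt.mpr h hlt

theorem fold_keep_flat (low : String) (gs : List (List String × String)) (r rb : Nat)
    (lb : String) (h : rb < r) :
    (pvFlatten r gs).foldl (pvBestStep low) (some (rb, lb)) = some (rb, lb) := by
  induction gs generalizing r with
  | nil => rfl
  | cons g t ih =>
    obtain ⟨kws, lbl⟩ := g
    simp only [pvFlatten, List.foldl_append]
    rw [fold_keep_group low kws r rb lbl lb (Nat.le_of_lt h)]
    exact ih (r + 1) (Nat.lt_succ_of_lt h)

theorem fold_group_none (low : String) (kws : List String) (r : Nat) (lbl : String) :
    (kws.map (fun k => (k, r, lbl))).foldl (pvBestStep low) none =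
      (if kws.any (fun k => PySem.Str.isIn k low) then some (r, lbl) else none) := by
  induction kws with
  | nil => rfl
  | cons k t ih =>
    simp only [List.map_cons, List.foldl_cons, List.any_cons, pvBestStep, Bool.and_true]
    by_cases hk : PySem.Str.isIn k low = true
    · rw [if_pos hk, fold_keep_group low t r r lbl lbl (Nat.le_refl r),
        if_pos (by rw [Bool.or_eq_true]; exact Or.inl hk)]
    · rw [if_neg hk, ih]
      by_cases ha : (t.any fun k => PySem.Str.isIn k low) = true
      · rw [if_pos ha, if_pos (by rw [Bool.or_eq_true]; exact Or.inr ha)]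
      · rw [if_neg ha, if_neg (by rw [Bool.or_eq_true]; rintro (h | h); exacts [hk h, ha h])]

theorem fold_flat_eq_firstHit (low : String) (gs : List (List String × String)) (r : Nat) :
    (pvFlatten r gs).foldl (pvBestStep low) none = pvFirstHit low r gs := by
  induction gs generalizing r with
  | nil => rfl
  | cons g t ih =>
    obtain ⟨kws, lbl⟩ := g
    simp only [pvFlatten, pvFirstHit, List.foldl_append, fold_group_none]
    by_cases h : (kws.any fun k => PySem.Str.isIn k low) = true
    · rw [if_pos h, if_pos h, fold_keep_flat low t (r + 1) r lbl (Nat.lt_succ_self r)]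
    · rw [if_neg h, if_neg h, ih]

theorem pvFinish_ite (c : Prop) [Decidable c] (a b : Option (Nat × String)) :
    pvFinish (if c then a else b) = if c then pvFinish a else pvFinish b :=
  apply_ite pvFinish c a b

theorem pvFinish_some (b : Nat × String) : pvFinish (some b) = b.2 := rfl

theorem pvFinish_none : pvFinish none = "other" := rfl

-- ===== VERDICT (by name: the statement is the Claim_ definition above) =====
set_option maxHeartbeats 1600000 in
theorem find_job_title_spec : Claim_equal_find_job_title := by
  intro row _
  unfold Spec_find_job_title find_job_title_alt pvFlat
  simp only [fold_flat_eq_firstHit]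
  unfold find_job_title pvGroups
  simp only [pvLoopHit_eq_any, pvFirstHit, List.any_cons, List.any_nil, Bool.or_false,
    pvFinish_ite, pvFinish_some, pvFinish_none]
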